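-- pv_equiv track=rewrite | github.com/DILiS-lab/pmotif_lib | pmotifs/positional_metrics.py | graphlet_occurrence_module_participation
-- ===== SOURCE A (Python) =====
-- from typing import List, Callable, Dict
--
-- def graphlet_occurrence_module_participation(modules: List[List[str]], graphlet_oc: List[str]):
--     participations = []
--     for i, p in enumerate(modules):
--         for node in graphlet_oc:
--             if node in p:
--                 participations.append(i)
--                 break
--     return participations
-- ===== SOURCE B (Python) =====
-- def graphlet_occurrence_module_participation(modules, graphlet_oc):
--     node_to_modules = {}
--     for i, module in enumerate(modules):
--         for node in module:
--             node_to_modules.setdefault(node, set()).add(i)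
--     hit = set()
--     for node in graphlet_oc:
--         hit |= node_to_modules.get(node, set())
--     return sorted(hit)
-- ===== Notes on version B (the rewrite author's own statement) =====
-- stated objective: faster
-- what changed: Replaced the per-module scan of the graphlet occurrence (with an inner membership scan over each module list) by a node-to-module-indices reverse index built once, a set union over the graphlet nodes, and a final sort of the participating indices.
import Mathlib
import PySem

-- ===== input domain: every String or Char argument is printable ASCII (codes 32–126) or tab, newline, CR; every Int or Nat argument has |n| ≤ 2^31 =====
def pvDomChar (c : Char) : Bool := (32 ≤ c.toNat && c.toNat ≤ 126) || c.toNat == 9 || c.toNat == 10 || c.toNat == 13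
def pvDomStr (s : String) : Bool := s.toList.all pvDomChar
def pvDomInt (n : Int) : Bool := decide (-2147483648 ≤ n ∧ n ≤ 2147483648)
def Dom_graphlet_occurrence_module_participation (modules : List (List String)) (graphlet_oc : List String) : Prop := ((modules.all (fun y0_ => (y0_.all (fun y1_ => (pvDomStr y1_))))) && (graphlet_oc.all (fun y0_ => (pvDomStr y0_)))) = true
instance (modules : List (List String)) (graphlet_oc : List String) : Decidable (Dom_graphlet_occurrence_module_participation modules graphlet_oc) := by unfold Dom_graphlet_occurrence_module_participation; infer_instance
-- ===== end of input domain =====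

-- B replaces A's nested membership scans by a node→module-indices reverse index, a set
-- union over the graphlet nodes and a final sort (objective: faster, asymptotically).


-- ===== PORT A =====
-- inner 'for node in graphlet_oc: if node in p: … break' — true iff some node hits p
def pvHitLoop (graphlet_oc : List String) (p : List String) : Bool :=
  match graphlet_oc with
  | [] => false
  | node :: rest => if p.contains node then true else pvHitLoop rest p

def graphlet_occurrence_module_participation (modules : List (List String)) (graphlet_oc : List String) : List Int :=
  (PySem.List.enumerate modules 0).foldl
    (fun participations ip =>
      if pvHitLoop graphlet_oc ip.2 then participations ++ [ip.1] else participations) []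

-- ===== PORT B =====
-- node_to_modules.setdefault(node, set()).add(i)
def pvBuildIndex (modules : List (List String)) : PySem.Dict String (PySem.Set Int) :=
  (PySem.List.enumerate modules 0).foldl
    (fun d im => im.2.foldl
      (fun d node => d.insert node (PySem.Set.add (d.getD node PySem.Set.empty) im.1)) d)
    PySem.Dict.empty

def graphlet_occurrence_module_participation_alt (modules : List (List String)) (graphlet_oc : List String) : List Int :=
  let idx := pvBuildIndex modules
  let hit : PySem.Set Int := graphlet_oc.foldl
    (fun hit node => PySem.Set.union hit (idx.getD node PySem.Set.empty)) PySem.Set.empty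
  PySem.List.sorted hit (fun x => x) false

-- ===== PRECONDITION & SPEC =====
def Spec_graphlet_occurrence_module_participation (modules : List (List String)) (graphlet_oc : List String) (out : List Int) : Prop := out = graphlet_occurrence_module_participation_alt modules graphlet_oc
instance (modules : List (List String)) (graphlet_oc : List String) (out : List Int) : Decidable (Spec_graphlet_occurrence_module_participation modules graphlet_oc out) := by unfold Spec_graphlet_occurrence_module_participation; infer_instance

-- ===== CLAIM (what is proved, stated in full; the proofs are below) =====
def Claim_equal_graphlet_occurrence_module_participation : Prop := ∀ (modules : List (List String)) (graphlet_oc : List String), Dom_graphlet_occurrence_module_participation modules graphlet_oc → Spec_graphlet_occurrence_module_participation modules graphlet_oc (graphlet_occurrence_module_participation modules graphlet_oc)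

-- ===== LEMMAS AND PROOFS =====

theorem pvHitLoop_eq_any (g p : List String) : pvHitLoop g p = g.any (fun n => p.contains n) := by
  induction g with
  | nil => simp [pvHitLoop]
  | cons x xs ih =>
    simp only [pvHitLoop, List.any_cons, ih]
    cases h : p.contains x <;> simp

theorem pvHitLoop_iff (g p : List String) : pvHitLoop g p = true ↔ ∃ n ∈ g, n ∈ p := by
  simp [pvHitLoop_eq_any, List.any_eq_true]

-- the inner per-module fold of pvBuildIndex
theorem pv_inner_mem (m : List String) (j : Int) (d : PySem.Dict String (PySem.Set Int)) (node : String) (i : Int) :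
    i ∈ (m.foldl (fun d n => d.insert n (PySem.Set.add (d.getD n PySem.Set.empty) j)) d).getD node PySem.Set.empty
      ↔ i ∈ d.getD node PySem.Set.empty ∨ (node ∈ m ∧ i = j) := by
  induction m generalizing d with
  | nil => simp
  | cons x xs ih =>
    simp only [List.foldl_cons, ih]
    rw [PySem.Dict.getD_insert]
    by_cases hx : node = x
    · subst hx; simp [PySem.Set.mem_add]
      exact fun _ h => Or.inr h
    · simp [hx]

theorem pvBuildIndex_mem (L : List (Int × List String)) (d : PySem.Dict String (PySem.Set Int)) (node : String) (i : Int) :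
    i ∈ (L.foldl (fun d im => im.2.foldl
          (fun d n => d.insert n (PySem.Set.add (d.getD n PySem.Set.empty) im.1)) d) d).getD node PySem.Set.empty
      ↔ i ∈ d.getD node PySem.Set.empty ∨ ∃ p ∈ L, node ∈ p.2 ∧ i = p.1 := by
  induction L generalizing d with
  | nil => simp
  | cons q qs ih =>
    simp only [List.foldl_cons, ih, pv_inner_mem, List.mem_cons]
    constructor
    · rintro (((h | h) | h))
      · exact Or.inl h
      · exact Or.inr ⟨q, Or.inl rfl, h⟩
      · obtain ⟨p, hp, hh⟩ := h; exact Or.inr ⟨p, Or.inr hp, hh⟩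
    · rintro (h | ⟨p, (rfl | hp), hh⟩)
      · exact Or.inl (Or.inl h)
      · exact Or.inl (Or.inr hh)
      · exact Or.inr ⟨p, hp, hh⟩

theorem pv_hit_mem (g : List String) (idx : PySem.Dict String (PySem.Set Int)) (h0 : PySem.Set Int) (i : Int) :
    i ∈ g.foldl (fun hit node => PySem.Set.union hit (idx.getD node PySem.Set.empty)) h0
      ↔ i ∈ h0 ∨ ∃ n ∈ g, i ∈ idx.getD n PySem.Set.empty := by
  induction g generalizing h0 with
  | nil => simp
  | cons x xs ih =>
    rw [List.foldl_cons, ih]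
    simp only [PySem.Set.mem_union, List.mem_cons]
    constructor
    · rintro ((h | h) | ⟨n, hn, hp⟩)
      · exact Or.inl h
      · exact Or.inr ⟨x, Or.inl rfl, h⟩
      · exact Or.inr ⟨n, Or.inr hn, hp⟩
    · rintro (h | ⟨n, (rfl | hn), hp⟩)
      · exact Or.inl (Or.inl h)
      · exact Or.inl (Or.inr hp)
      · exact Or.inr ⟨n, hn, hp⟩

theorem pv_hit_nodup (g : List String) (idx : PySem.Dict String (PySem.Set Int)) (h0 : PySem.Set Int)
    (hn : h0.Nodup) :
    (g.foldl (fun hit node => PySem.Set.union hit (idx.getD node PySem.Set.empty)) h0).Nodup := by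
  induction g generalizing h0 with
  | nil => exact hn
  | cons x xs ih => exact ih _ (PySem.Set.nodup_union _ _ hn)

-- A's result, closed form
theorem pvA_eq (modules : List (List String)) (g : List String) :
    graphlet_occurrence_module_participation modules g
      = ((PySem.List.enumerate modules 0).filter (fun ip => pvHitLoop g ip.2)).map (·.1) := by
  unfold graphlet_occurrence_module_participation
  simpa using PySem.List.foldl_append_if (fun ip => pvHitLoop g ip.2)
    (fun ip : Int × List String => ip.1) (PySem.List.enumerate modules 0) []

theorem pvA_pairwise (modules : List (List String)) (g : List String) :
    (graphlet_occurrence_module_participation modules g).Pairwise (· < ·) := by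
  rw [pvA_eq]
  rw [List.pairwise_map]
  exact (PySem.List.pairwise_lt_enumerate modules 0).filter _

-- ===== VERDICT (by name: the statement is the Claim_ definition above) =====
theorem graphlet_occurrence_module_participation_spec : Claim_equal_graphlet_occurrence_module_participation := by
  intro modules g _
  unfold Spec_graphlet_occurrence_module_participation graphlet_occurrence_module_participation_alt
  have hpair := pvA_pairwise modules g
  have hnodup : (graphlet_occurrence_module_participation modules g).Nodup :=
    hpair.imp (fun h => ne_of_lt h)
  have hhitnodup := pv_hit_nodup g (pvBuildIndex modules) PySem.Set.empty List.nodup_nil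
  have hperm : (graphlet_occurrence_module_participation modules g).Perm
      (g.foldl (fun hit node => PySem.Set.union hit ((pvBuildIndex modules).getD node PySem.Set.empty)) PySem.Set.empty) := by
    rw [List.perm_ext_iff_of_nodup hnodup hhitnodup]
    intro i
    rw [pv_hit_mem, pvA_eq]
    unfold pvBuildIndex
    simp only [pvBuildIndex_mem, PySem.Dict.getD_empty, List.mem_map, List.mem_filter]
    constructor
    · rintro ⟨ip, ⟨hmem, hhit⟩, rfl⟩
      obtain ⟨n, hn, hnp⟩ := (pvHitLoop_iff g ip.2).mp hhit
      exact Or.inr ⟨n, hn, Or.inr ⟨ip, hmem, hnp, rfl⟩⟩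
    · rintro (h | ⟨n, hn, (h | ⟨p, hp, hnp, rfl⟩)⟩)
      · exact absurd h (List.not_mem_nil)
      · exact absurd h (List.not_mem_nil)
      · exact ⟨p, ⟨hp, (pvHitLoop_iff g p.2).mpr ⟨n, hn, hnp⟩⟩, rfl⟩
  exact (PySem.List.sorted_eq_of_perm_of_pairwise_lt _ _ (fun x => x) hperm hpair).symm
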